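-- pv_equiv track=rewrite | github.com/HaloKim/self_study | 1d1c/프로그래머스/# 모음사전.py | solution
-- ===== SOURCE A (Python) =====
-- def solution(word):
--     ans = 0
--     dict = {"E": 1, "I": 2, "O": 3, "U": 4}
--     for i in range(len(word)):
--         if word[i] == 'A':
--             ans += 1
--         else:
--             for j in range(4,i,-1):
--                 ans += pow(5,j-i) * dict[word[i]]
--             ans += dict[word[i]] + 1
--     return ans
-- ===== SOURCE B (Python) =====
-- def solution(word):
--     value = {'A': 0, 'E': 1, 'I': 2, 'O': 3, 'U': 4}
--     return len(word) + sum(value[c] * ((5 ** (max(0, 4 - i) + 1) - 1) // 4)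
--                            for i, c in enumerate(word))
-- ===== Notes on version B (the rewrite author's own statement) =====
-- stated objective: alternative
-- what changed: Replaced A's nested loop (an inner geometric-sum loop per character) by a single pass that multiplies each letter's value by a closed-form positional weight (5**(max(0,4-i)+1)-1)//4 and adds the word length.
import Mathlib
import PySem

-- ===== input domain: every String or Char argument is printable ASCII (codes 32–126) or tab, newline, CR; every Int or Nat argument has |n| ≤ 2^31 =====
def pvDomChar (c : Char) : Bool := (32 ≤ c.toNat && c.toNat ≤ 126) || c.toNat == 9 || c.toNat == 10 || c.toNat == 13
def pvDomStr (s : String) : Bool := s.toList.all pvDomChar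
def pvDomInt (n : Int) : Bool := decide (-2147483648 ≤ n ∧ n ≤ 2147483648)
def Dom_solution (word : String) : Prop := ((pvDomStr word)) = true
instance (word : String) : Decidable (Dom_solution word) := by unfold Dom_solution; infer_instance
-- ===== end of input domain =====

-- B replaces A's inner geometric-sum loop by a closed-form positional weight (single pass).

-- ===== PORT A =====
-- the dict {"E":1,"I":2,"O":3,"U":4}; lookup dict[word[i]] is ported as getD … 0:
-- Python raises KeyError on a non-vowel, which Pre_solution excludes (and 'A' never reaches the lookup).
def pvDictA : PySem.Dict Char Int := PySem.Dict.ofList [('E', 1), ('I', 2), ('O', 3), ('U', 4)]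

def solution (word : String) : Int :=
  let cs := word.toList
  (PySem.List.pyRange 0 (cs.length : Int) 1).foldl (fun ans i =>
    let c := PySem.List.pyGetD cs i 'A'
    if c = 'A' then ans + 1
    else
      -- pow(5, j-i): j > i in range(4, i, -1), so the exponent is positive and .toNat is exact
      let ans := (PySem.List.pyRange 4 i (-1)).foldl
        (fun a j => a + (5 : Int) ^ (j - i).toNat * PySem.Dict.getD pvDictA c 0) ans
      ans + PySem.Dict.getD pvDictA c 0 + 1) 0

-- ===== PORT B =====
def pvDictB : PySem.Dict Char Int :=
  PySem.Dict.ofList [('A', 0), ('E', 1), ('I', 2), ('O', 3), ('U', 4)]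

def pvWeight (i : Int) : Int :=
  PySem.Int.floordiv ((5 : Int) ^ ((max 0 (4 - i)).toNat + 1) - 1) 4

def solution_alt (word : String) : Int :=
  let cs := word.toList
  (cs.length : Int) +
    ((PySem.List.enumerate cs 0).map (fun p => PySem.Dict.getD pvDictB p.2 0 * pvWeight p.1)).sum

-- ===== PRECONDITION & SPEC =====
-- Pre_ excludes words containing a character other than A/E/I/O/U: Python A raises KeyError there (and B too).
def Pre_solution (word : String) : Prop :=
  (word.toList.all (fun c => c == 'A' || c == 'E' || c == 'I' || c == 'O' || c == 'U')) = true
instance (word : String) : Decidable (Pre_solution word) := by unfold Pre_solution; infer_instance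

def pvWitness_solution : String := "EIO"

def Spec_solution (word : String) (out : Int) : Prop := out = solution_alt word
instance (word : String) (out : Int) : Decidable (Spec_solution word out) := by unfold Spec_solution; infer_instance

-- ===== CLAIM (what is proved, stated in full; the proofs are below) =====
def Claim_equal_solution : Prop :=
  ∀ (word : String), Dom_solution word → Pre_solution word → Spec_solution word (solution word)

-- ===== LEMMAS AND PROOFS =====

-- contribution of one position in B
def pvG (p : Int × Char) : Int := PySem.Dict.getD pvDictB p.2 0 * pvWeight p.1

-- inner geometric loop of A, as a sum
lemma pv_inner (i v a : Int) (hi : 0 ≤ i) :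
    (PySem.List.pyRange 4 i (-1)).foldl (fun acc j => acc + (5 : Int) ^ (j - i).toNat * v) a
      = a + v * (pvWeight i - 1) := by
  rw [PySem.List.foldl_add]
  rcases lt_or_ge i 4 with h | h
  · interval_cases i <;>
      simp [show PySem.List.pyRange 4 0 (-1) = [4,3,2,1] from by decide,
            show PySem.List.pyRange 4 1 (-1) = [4,3,2] from by decide,
            show PySem.List.pyRange 4 2 (-1) = [4,3] from by decide,
            show PySem.List.pyRange 4 3 (-1) = [4] from by decide, pvWeight] <;>
      norm_num [PySem.Int.floordiv] <;> try ring
  · rw [PySem.List.pyRange_neg_one_eq_nil h]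
    have : (max 0 (4 - i)).toNat = 0 := by omega
    simp [pvWeight, this, PySem.Int.floordiv]

-- the two dicts agree away from 'A'
lemma pv_dictAB (c : Char) (hA : c ≠ 'A') : PySem.Dict.getD pvDictA c 0 = PySem.Dict.getD pvDictB c 0 := by
  by_cases hE : c = 'E'
  · subst hE; decide
  by_cases hI : c = 'I'
  · subst hI; decide
  by_cases hO : c = 'O'
  · subst hO; decide
  by_cases hU : c = 'U'
  · subst hU; decide
  have h1 : ('A' == c) = false := beq_eq_false_iff_ne.mpr (Ne.symm hA)
  have h2 : ('E' == c) = false := beq_eq_false_iff_ne.mpr (Ne.symm hE)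
  have h3 : ('I' == c) = false := beq_eq_false_iff_ne.mpr (Ne.symm hI)
  have h4 : ('O' == c) = false := beq_eq_false_iff_ne.mpr (Ne.symm hO)
  have h5 : ('U' == c) = false := beq_eq_false_iff_ne.mpr (Ne.symm hU)
  simp [pvDictA, pvDictB, PySem.Dict.getD, PySem.Dict.get?, PySem.Dict.ofList,
    PySem.Dict.update, PySem.Dict.insert, PySem.Dict.empty, List.find?, h1, h2, h3, h4, h5]

-- A's loop body adds exactly 1 + pvG (i, c), for every character
lemma pv_step (ans i : Int) (c : Char) (hi : 0 ≤ i) :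
    (if c = 'A' then ans + 1
     else
       ((PySem.List.pyRange 4 i (-1)).foldl
          (fun a j => a + (5 : Int) ^ (j - i).toNat * PySem.Dict.getD pvDictA c 0) ans)
         + PySem.Dict.getD pvDictA c 0 + 1)
      = ans + 1 + pvG (i, c) := by
  by_cases hA : c = 'A'
  · subst hA
    rw [if_pos rfl]
    have h0 : PySem.Dict.getD pvDictB 'A' 0 = 0 := by decide
    simp [pvG, h0]
  · rw [if_neg hA, pv_inner i (PySem.Dict.getD pvDictA c 0) ans hi, pv_dictAB c hA]
    simp only [pvG]
    ring

-- folding A's body over any enumerate-style list with nonneg indices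
lemma pv_fold (l : List (Int × Char)) (a : Int) (h : ∀ p ∈ l, 0 ≤ p.1) :
    l.foldl (fun ans p =>
      if p.2 = 'A' then ans + 1
      else
        ((PySem.List.pyRange 4 p.1 (-1)).foldl
           (fun acc j => acc + (5 : Int) ^ (j - p.1).toNat * PySem.Dict.getD pvDictA p.2 0) ans)
          + PySem.Dict.getD pvDictA p.2 0 + 1) a
      = a + l.length + (l.map pvG).sum := by
  induction l generalizing a with
  | nil => simp
  | cons p t ih =>
    simp only [List.foldl_cons, List.map_cons, List.sum_cons, List.length_cons]
    rw [pv_step a p.1 p.2 (h p (by simp))]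
    rw [ih _ (fun q hq => h q (by simp [hq]))]
    push_cast; ring

-- ===== VERDICT (by name: the statement is the Claim_ definition above) =====
theorem solution_spec : Claim_equal_solution := by
  intro word _ _
  show solution word = solution_alt word
  unfold solution solution_alt
  dsimp only
  have hnn : ∀ p ∈ (PySem.List.pyRange 0 ((word.toList.length : Int)) 1).map
      (fun j => (j, PySem.List.pyGetD word.toList j 'A')), 0 ≤ p.1 := by
    intro p hp
    simp only [List.mem_map] at hp
    rcases hp with ⟨j, hj, rfl⟩
    exact (PySem.List.mem_pyRange_one.1 hj).1
  have h1 :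
      List.foldl
        (fun ans i =>
          if PySem.List.pyGetD word.toList i 'A' = 'A' then ans + 1
          else
            List.foldl
                (fun a j => a + (5 : Int) ^ (j - i).toNat *
                  PySem.Dict.getD pvDictA (PySem.List.pyGetD word.toList i 'A') 0) ans
                (PySem.List.pyRange 4 i (-1)) +
              PySem.Dict.getD pvDictA (PySem.List.pyGetD word.toList i 'A') 0 + 1)
        0 (PySem.List.pyRange 0 ((word.toList.length : Int))) =
      List.foldl
        (fun ans p =>
          if p.2 = 'A' then ans + 1
          else
            List.foldl
                (fun a j => a + (5 : Int) ^ (j - p.1).toNat * PySem.Dict.getD pvDictA p.2 0) ans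
                (PySem.List.pyRange 4 p.1 (-1)) +
              PySem.Dict.getD pvDictA p.2 0 + 1)
        0 ((PySem.List.pyRange 0 ((word.toList.length : Int))).map
            (fun j => (j, PySem.List.pyGetD word.toList j 'A'))) := by
    rw [List.foldl_map]
  rw [pv_fold _ 0 hnn] at h1
  refine h1.trans ?_
  rw [PySem.List.enumerate_eq_map_pyRange word.toList 'A', List.map_map, List.map_map]
  simp [PySem.List.length_pyRange_one]
  simp only [Function.comp_def, pvG]
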